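-- pv_equiv track=rewrite | github.com/IlJuma/Optimization_algorithm | pipeline/4_oracle_coverage_evaluation.py | find_covered_contigs
-- ===== SOURCE A (Python) =====
-- from typing import Dict, List, Tuple, Iterable
--
-- def find_covered_contigs(coverage: List[int]) -> List[Tuple[int, int]]:
--     contigs = []
--     in_contig = False
--     contig_start = None
--
--     for i, cov in enumerate(coverage):
--         if cov > 0 and not in_contig:
--             in_contig = True
--             contig_start = i
--         elif cov == 0 and in_contig:
--             contigs.append((contig_start, i))
--             in_contig = False
--             contig_start = None
--
--     if in_contig:
--         contigs.append((contig_start, len(coverage)))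
--
--     return contigs
-- ===== SOURCE B (Python) =====
-- def find_covered_contigs(coverage):
--     # pass 1: activity state at each position (negatives keep the previous state)
--     active = []
--     s = False
--     for cov in coverage:
--         if cov > 0:
--             s = True
--         elif cov == 0:
--             s = False
--         active.append(s)
--     # pass 2: rising edges are starts, falling edges (with a virtual False past the end) are ends; pair them up
--     prev = [False] + active
--     starts = [i for i, (p, a) in enumerate(zip(prev, active)) if a and not p]
--     ends = [i for i, (p, a) in enumerate(zip(prev, active + [False])) if p and not a]
--     return list(zip(starts, ends))
-- ===== Notes on version B (the rewrite author's own statement) =====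
-- stated objective: alternative
-- what changed: Replaces A's single stateful loop with in_contig/contig_start bookkeeping by two passes: first a carried activity-state list, then rising-edge and falling-edge index lists built by comprehensions over the list zipped with its shift, paired into intervals with zip.
import Mathlib
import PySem

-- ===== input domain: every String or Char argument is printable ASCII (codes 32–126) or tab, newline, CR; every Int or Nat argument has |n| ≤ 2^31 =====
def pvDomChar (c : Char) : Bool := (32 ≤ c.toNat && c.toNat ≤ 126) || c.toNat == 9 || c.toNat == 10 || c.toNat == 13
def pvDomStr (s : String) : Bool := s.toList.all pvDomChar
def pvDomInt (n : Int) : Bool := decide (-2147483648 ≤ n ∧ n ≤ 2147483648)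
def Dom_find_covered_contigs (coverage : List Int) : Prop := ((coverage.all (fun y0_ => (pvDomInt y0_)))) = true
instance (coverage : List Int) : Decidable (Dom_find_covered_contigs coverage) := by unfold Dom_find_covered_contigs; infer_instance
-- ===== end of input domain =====

-- B separates the work into two passes — an activity-state list, then rising/falling-edge
-- index lists paired by zip — instead of A's single stateful interval-building loop (objective: alternative).

-- ===== PORT A =====
-- loop body of A's for-loop; state = (contigs, in_contig, contig_start)
def findA_step (st : List (Int × Int) × Bool × Option Int) (p : Int × Int) :
    List (Int × Int) × Bool × Option Int :=
  if p.2 > 0 ∧ st.2.1 = false then (st.1, true, some p.1)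
  else if p.2 = 0 ∧ st.2.1 = true then (st.1 ++ [(st.2.2.getD 0, p.1)], false, none)
  else st

def find_covered_contigs (coverage : List Int) : List (Int × Int) :=
  let st := (PySem.List.enumerate coverage 0).foldl findA_step ([], false, none)
  if st.2.1 then st.1 ++ [(st.2.2.getD 0, (coverage.length : Int))] else st.1

-- ===== PORT B =====
-- pass 1 of B: the carried activity state at each position
def altActive : List Int → Bool → List Bool
  | [], _ => []
  | c :: t, s =>
    let s' := if c > 0 then true else if c = 0 then false else s
    s' :: altActive t s'

def find_covered_contigs_alt (coverage : List Int) : List (Int × Int) :=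
  let active := altActive coverage false
  let prev := false :: active
  let starts := (PySem.List.enumerate (prev.zip active) 0).filterMap
      (fun q => if q.2.2 && !q.2.1 then some q.1 else none)
  let ends := (PySem.List.enumerate (prev.zip (active ++ [false])) 0).filterMap
      (fun q => if q.2.1 && !q.2.2 then some q.1 else none)
  starts.zip ends

-- ===== PRECONDITION & SPEC =====
def Spec_find_covered_contigs (coverage : List Int) (out : List (Int × Int)) : Prop := out = find_covered_contigs_alt coverage
instance (coverage : List Int) (out : List (Int × Int)) : Decidable (Spec_find_covered_contigs coverage out) := by unfold Spec_find_covered_contigs; infer_instance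

-- ===== CLAIM (what is proved, stated in full; the proofs are below) =====
def Claim_equal_find_covered_contigs : Prop := ∀ (coverage : List Int), Dom_find_covered_contigs coverage → Spec_find_covered_contigs coverage (find_covered_contigs coverage)

-- ===== LEMMAS AND PROOFS =====

-- rising-edge indices of a boolean list, carrying the previous state
def pvSx (i : Int) (prev : Bool) : List Bool → List Int
  | [] => []
  | a :: t => if a && !prev then i :: pvSx (i+1) a t else pvSx (i+1) a t

-- falling-edge indices (one virtual false past the end)
def pvEx (i : Int) (prev : Bool) : List Bool → List Int
  | [] => if prev then [i] else []
  | a :: t => if prev && !a then i :: pvEx (i+1) a t else pvEx (i+1) a t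

-- A's final step as a function of the end index
def pvFinA (n : Int) (st : List (Int × Int) × Bool × Option Int) : List (Int × Int) :=
  if st.2.1 then st.1 ++ [(st.2.2.getD 0, n)] else st.1

theorem pv_starts_eq (l : List Bool) : ∀ (b : Bool) (i : Int),
    (PySem.List.enumerate ((b :: l).zip l) i).filterMap
      (fun q => if q.2.2 && !q.2.1 then some q.1 else none) = pvSx i b l := by
  induction l with
  | nil => intro b i; simp [pvSx]
  | cons a t ih =>
    intro b i
    rw [List.zip_cons_cons, PySem.List.enumerate_cons, List.filterMap_cons, ih]
    by_cases h : a && !b <;> simp [h, pvSx]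

theorem pv_ends_eq (l : List Bool) : ∀ (b : Bool) (i : Int),
    (PySem.List.enumerate ((b :: l).zip (l ++ [false])) i).filterMap
      (fun q => if q.2.1 && !q.2.2 then some q.1 else none) = pvEx i b l := by
  induction l with
  | nil => intro b i; cases b <;> simp [pvEx, PySem.List.enumerate]
  | cons a t ih =>
    intro b i
    rw [List.cons_append, List.zip_cons_cons, PySem.List.enumerate_cons, List.filterMap_cons, ih]
    by_cases h : b && !a <;> simp [h, pvEx]

theorem pv_main (l : List Int) : ∀ (i : Int) (contigs : List (Int × Int)) (inC : Bool) (cs : Option Int),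
    pvFinA (i + l.length) ((PySem.List.enumerate l i).foldl findA_step (contigs, inC, cs)) =
      contigs ++ List.zip ((if inC then [cs.getD 0] else []) ++ pvSx i inC (altActive l inC))
                          (pvEx i inC (altActive l inC)) := by
  induction l with
  | nil =>
    intro i contigs inC cs
    cases inC <;> simp [pvFinA, pvSx, pvEx, altActive, PySem.List.enumerate]
  | cons c t ih =>
    intro i contigs inC cs
    simp only [PySem.List.enumerate_cons, List.foldl_cons, List.length_cons]
    have harith : i + ((t.length : Int) + 1) = (i + 1) + t.length := by ring
    push_cast
    rw [harith]
    by_cases hc : c > 0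
    · cases inC with
      | false =>
        have hstep : findA_step (contigs, false, cs) (i, c) = (contigs, true, some i) := by
          simp [findA_step, hc]
        rw [hstep, ih]
        simp [altActive, hc, pvSx, pvEx]
      | true =>
        have hstep : findA_step (contigs, true, cs) (i, c) = (contigs, true, cs) := by
          simp [findA_step, hc, show ¬ (c = 0) by omega]
        rw [hstep, ih]
        simp [altActive, hc, pvSx, pvEx]
    · by_cases hc0 : c = 0
      · cases inC with
        | false =>
          have hstep : findA_step (contigs, false, cs) (i, c) = (contigs, false, cs) := by
            simp [findA_step, hc]
          rw [hstep, ih]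
          simp [altActive, hc0, pvSx, pvEx]
        | true =>
          have hstep : findA_step (contigs, true, cs) (i, c) =
              (contigs ++ [(cs.getD 0, i)], false, none) := by
            simp [findA_step, hc0]
          rw [hstep, ih]
          simp [altActive, hc0, pvSx, pvEx]
      · have hstep : findA_step (contigs, inC, cs) (i, c) = (contigs, inC, cs) := by
          cases inC <;> simp [findA_step, hc, hc0]
        rw [hstep, ih]
        cases inC <;> simp [altActive, hc, hc0, pvSx, pvEx]

-- ===== VERDICT (by name: the statement is the Claim_ definition above) =====
theorem find_covered_contigs_spec : Claim_equal_find_covered_contigs := by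
  intro coverage _
  unfold Spec_find_covered_contigs find_covered_contigs find_covered_contigs_alt
  have h := pv_main coverage 0 [] false none
  simp only [pvFinA, zero_add, Bool.false_eq_true, if_false, List.nil_append] at h
  simp only [pv_starts_eq, pv_ends_eq]
  exact h
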